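-- pv_equiv track=rewrite | github.com/tinydotai/bitpulse.market_data_aggregator | src/data_processing/extract_old_stats.py | group_documents
-- ===== SOURCE A (Python) =====
-- from typing import List, Dict
--
-- def group_documents(documents: List[Dict]) -> Dict:
--     """Group documents by symbol and source."""
--     grouped_data = {}
--     for doc in documents:
--         if doc is None:
--             continue
--
--         key = f"{doc['symbol']}_{doc['source']}"
--         if key not in grouped_data:
--             grouped_data[key] = []
--         grouped_data[key].append(doc)
--
--     return grouped_data
-- ===== SOURCE B (Python) =====
-- from typing import List, Dict
--
-- def group_documents(documents: List[Dict]) -> Dict: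
--     """Group documents by symbol and source."""
--     docs = [d for d in documents if d is not None]
--     keys = list(dict.fromkeys(f"{d['symbol']}_{d['source']}" for d in docs))
--     return {k: [d for d in docs if f"{d['symbol']}_{d['source']}" == k] for k in keys}
-- ===== Notes on version B (the rewrite author's own statement) =====
-- stated objective: alternative
-- what changed: B replaces A's incremental dict-building loop (create-empty-bucket-then-append per document) by a two-phase plan: dedup the key list once (dict.fromkeys) and then build each group with a per-key filter comprehension over the documents.
import Mathlib
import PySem

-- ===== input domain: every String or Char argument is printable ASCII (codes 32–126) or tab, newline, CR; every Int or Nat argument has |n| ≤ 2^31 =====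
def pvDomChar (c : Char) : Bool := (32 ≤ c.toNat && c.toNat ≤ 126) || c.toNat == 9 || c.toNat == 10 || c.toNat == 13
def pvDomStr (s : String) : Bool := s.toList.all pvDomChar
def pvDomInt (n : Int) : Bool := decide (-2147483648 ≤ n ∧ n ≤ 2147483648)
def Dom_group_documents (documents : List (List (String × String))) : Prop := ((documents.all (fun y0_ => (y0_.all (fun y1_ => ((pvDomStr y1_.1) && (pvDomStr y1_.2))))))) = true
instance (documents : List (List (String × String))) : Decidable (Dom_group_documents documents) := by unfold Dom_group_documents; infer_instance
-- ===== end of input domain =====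

-- B groups by deduplicating the key list once and filtering the documents per key, instead of
-- A's incremental dict insertion; equal return value on Pre_ (no None documents exist in the Lean type).

-- ===== PORT A =====
-- f"{doc['symbol']}_{doc['source']}"; under Pre_ both keys are present, so getD never takes its default
def pvKeyA (doc : List (String × String)) : String :=
  PySem.Dict.getD (PySem.Dict.mk doc) "symbol" "" ++ "_" ++ PySem.Dict.getD (PySem.Dict.mk doc) "source" ""

def group_documents (documents : List (List (String × String))) : List (String × List (List (String × String))) :=
  (documents.foldl (fun grouped doc =>
      let key := pvKeyA doc
      let grouped := if grouped.contains key then grouped else grouped.insert key ([] : List (List (String × String)))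
      grouped.modify key [] (fun l => l ++ [doc]))
    (PySem.Dict.empty : PySem.Dict String (List (List (String × String))))).items

-- ===== PORT B =====
def pvKeyB (doc : List (String × String)) : String :=
  PySem.Dict.getD (PySem.Dict.mk doc) "symbol" "" ++ "_" ++ PySem.Dict.getD (PySem.Dict.mk doc) "source" ""

def group_documents_alt (documents : List (List (String × String))) : List (String × List (List (String × String))) :=
  (PySem.List.dedup (documents.map pvKeyB)).map
    (fun k => (k, documents.filter (fun d => pvKeyB d == k)))

-- ===== PRECONDITION & SPEC =====
-- Pre_ excludes documents missing a 'symbol' or 'source' key (Python A raises KeyError there), and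
-- duplicate-key association lists, which do not represent a Python dict unambiguously.
def Pre_group_documents (documents : List (List (String × String))) : Prop :=
  ∀ d ∈ documents, (d.map Prod.fst).Nodup ∧ "symbol" ∈ d.map Prod.fst ∧ "source" ∈ d.map Prod.fst
instance (documents : List (List (String × String))) : Decidable (Pre_group_documents documents) := by unfold Pre_group_documents; infer_instance
def pvWitness_group_documents : (List (List (String × String))) :=
  [[("symbol", "BTC"), ("source", "kraken")], [("symbol", "BTC"), ("source", "kraken"), ("price", "7")]]

def Spec_group_documents (documents : List (List (String × String))) (out : List (String × List (List (String × String)))) : Prop := out = group_documents_alt documents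
instance (documents : List (List (String × String))) (out : List (String × List (List (String × String)))) : Decidable (Spec_group_documents documents out) := by unfold Spec_group_documents; infer_instance

-- ===== CLAIM (what is proved, stated in full; the proofs are below) =====
def Claim_equal_group_documents : Prop := ∀ (documents : List (List (String × String))), Dom_group_documents documents → Pre_group_documents documents → Spec_group_documents documents (group_documents documents)

-- ===== LEMMAS AND PROOFS =====

-- A's "if key not in grouped: grouped[key] = []" followed by the append is one Dict.modify
theorem pv_insert_modify {κ ν : Type} [BEq κ] [LawfulBEq κ] (d : PySem.Dict κ ν) (k : κ) (d0 : ν) (f : ν → ν)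
    (h : d.contains k = false) :
    (d.insert k d0).modify k d0 f = d.modify k d0 f := by
  have hk : ∀ p ∈ d.items, (p.1 == k) = false := by
    intro p hp
    have : p.1 ∈ d.keys := PySem.Dict.mem_keys_of_mem_items d hp
    by_contra hb
    simp at hb
    subst hb
    rw [← PySem.Dict.contains_iff_mem_keys] at this
    simp [this] at h
  simp [PySem.Dict.modify, PySem.Dict.insert, h]
  constructor
  · rw [List.map_congr_left (g := id), List.map_id]
    intro p hp
    simp [hk p hp]
  · have h1 : (d.insert k d0).getD k d0 = d0 := PySem.Dict.getD_insert_self d k d0 d0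
    have h2 : d.getD k d0 = d0 := PySem.Dict.getD_of_not_contains d d0 h
    simp [PySem.Dict.insert, h] at h1
    rw [h1, h2]

theorem pv_step_eq (g : PySem.Dict String (List (List (String × String)))) (doc : List (String × String)) :
    (if g.contains (pvKeyA doc) then g else g.insert (pvKeyA doc) []).modify (pvKeyA doc) [] (fun l => l ++ [doc])
      = g.modify (pvKeyA doc) [] (fun l => l ++ [doc]) := by
  by_cases h : g.contains (pvKeyA doc)
  · simp [h]
  · simp only [Bool.not_eq_true] at h
    rw [if_neg (by simp [h])]
    exact pv_insert_modify g (pvKeyA doc) [] _ h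


theorem pv_fold_eq (xs : List (List (String × String))) (d : PySem.Dict String (List (List (String × String)))) :
    xs.foldl (fun grouped doc =>
      let key := pvKeyA doc
      let grouped := if grouped.contains key then grouped else grouped.insert key ([] : List (List (String × String)))
      grouped.modify key [] (fun l => l ++ [doc])) d
    = (xs.map (fun doc => (pvKeyA doc, doc))).foldl
        (fun d p => d.modify p.1 [] (fun l => l ++ [p.2])) d := by
  rw [List.foldl_map]
  simp only [pv_step_eq]

-- ===== VERDICT (by name: the statement is the Claim_ definition above) =====
theorem group_documents_spec : Claim_equal_group_documents := by
  intro documents _ _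
  unfold Spec_group_documents group_documents group_documents_alt
  rw [pv_fold_eq]
  have hkey : pvKeyB = pvKeyA := rfl
  set l := documents.map (fun doc => (pvKeyA doc, doc)) with hl
  set D := l.foldl (fun d p => d.modify p.1 [] (fun ls => ls ++ [p.2])) PySem.Dict.empty with hD
  have hkeys : D.keys = PySem.Set.update (PySem.Dict.empty : PySem.Dict String (List (List (String × String)))).keys (l.map Prod.fst) := by
    exact PySem.Dict.keys_foldl_modify_key l Prod.fst [] (fun d p ls => ls ++ [p.2]) PySem.Dict.empty
  have hnd : D.keys.Nodup := by
    exact PySem.Dict.nodup_keys_foldl_modify_key l Prod.fst [] (fun d p ls => ls ++ [p.2]) PySem.Dict.empty (by simp)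
  have hget : ∀ k, D.getD k [] = documents.filter (fun d => pvKeyA d == k) := by
    intro k
    rw [hD, PySem.Dict.getD_foldl_modify_append]
    rw [hl, List.filter_map, List.map_map]
    simp [PySem.Dict.getD_empty, Function.comp_def]
  rw [PySem.Dict.items_eq_map_keys D hnd [], hkeys]
  have hupd : PySem.Set.update (PySem.Dict.empty : PySem.Dict String (List (List (String × String)))).keys (l.map Prod.fst)
      = PySem.List.dedup (documents.map pvKeyB) := by
    rw [hkey, hl, List.map_map]
    simp [PySem.List.dedup_eq_ofList, PySem.Set.update, PySem.Set.ofList_eq_foldl, PySem.Dict.keys_empty, Function.comp_def]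
  rw [hupd]
  apply List.map_congr_left
  intro k _
  rw [hget k, hkey]
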